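-- pv_equiv track=rewrite | github.com/Guojia2/stupid_hackathon | app.py | calculate_aq10_score
-- ===== SOURCE A (Python) =====
-- def calculate_aq10_score(responses):
--     """Calculate the traditional AQ-10 score (0-10)."""
--     score = 0
--
--     # Questions where Agree scores 1 point
--     agree_questions = [1, 7, 8, 10]
--     for q in agree_questions:
--         response = responses.get(f'q{q}', '')
--         if response in ['definitely-agree', 'slightly-agree']:
--             score += 1
--
--     # Questions where Disagree scores 1 point
--     disagree_questions = [2, 3, 4, 5, 6, 9]
--     for q in disagree_questions:
--         response = responses.get(f'q{q}', '')
--         if response in ['definitely-disagree', 'slightly-disagree']: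
--             score += 1
--
--     return score
-- ===== SOURCE B (Python) =====
-- def calculate_aq10_score(responses):
--     """Calculate the traditional AQ-10 score (0-10)."""
--     scoring = {(f'q{q}', a) for q in (1, 7, 8, 10)
--                for a in ('definitely-agree', 'slightly-agree')}
--     scoring |= {(f'q{q}', a) for q in (2, 3, 4, 5, 6, 9)
--                 for a in ('definitely-disagree', 'slightly-disagree')}
--     return sum(1 for item in responses.items() if item in scoring)
-- ===== Notes on version B (the rewrite author's own statement) =====
-- stated objective: alternative
-- what changed: B inverts the traversal: instead of looking up each of the 10 question keys in the dict across two categorized loops, it builds a set of the 20 scoring (question, answer) pairs once and counts which of the respondent's own items lie in that set, so the per-question .get lookups disappear.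
import Mathlib
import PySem

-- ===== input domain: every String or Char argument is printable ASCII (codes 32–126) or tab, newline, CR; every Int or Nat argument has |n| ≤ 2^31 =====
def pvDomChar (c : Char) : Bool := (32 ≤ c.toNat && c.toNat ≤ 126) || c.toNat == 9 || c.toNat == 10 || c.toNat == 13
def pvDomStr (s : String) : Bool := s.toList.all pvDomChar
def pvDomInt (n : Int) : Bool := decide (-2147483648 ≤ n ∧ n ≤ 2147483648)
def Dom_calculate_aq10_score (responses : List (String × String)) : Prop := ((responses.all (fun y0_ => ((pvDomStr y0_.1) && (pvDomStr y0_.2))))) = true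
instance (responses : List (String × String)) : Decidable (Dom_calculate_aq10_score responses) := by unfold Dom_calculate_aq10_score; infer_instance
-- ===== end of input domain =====

-- B inverts the traversal: it builds the set of the 20 scoring (question, answer) pairs once
-- and counts which of the respondent's items lie in it, instead of looking up each of the
-- 10 question keys in the dict (objective: alternative, same cost).
-- ===== PORT A =====
def calculate_aq10_score (responses : List (String × String)) : Int :=
  let score : Int := 0
  let score := ([1, 7, 8, 10] : List Int).foldl (fun score q =>
    let response := (responses.lookup ("q" ++ PySem.Int.toStr q)).getD ""
    if response = "definitely-agree" ∨ response = "slightly-agree" then score + 1 else score) score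
  let score := ([2, 3, 4, 5, 6, 9] : List Int).foldl (fun score q =>
    let response := (responses.lookup ("q" ++ PySem.Int.toStr q)).getD ""
    if response = "definitely-disagree" ∨ response = "slightly-disagree" then score + 1 else score) score
  score

-- ===== PORT B =====
-- the set `scoring` of Source B, built as a set comprehension then |= a second one
def aq10Scoring : PySem.Set (String × String) :=
  PySem.Set.union
    (PySem.Set.ofList (([1, 7, 8, 10] : List Int).flatMap (fun q =>
      (["definitely-agree", "slightly-agree"]).map (fun a => ("q" ++ PySem.Int.toStr q, a)))))
    (([2, 3, 4, 5, 6, 9] : List Int).flatMap (fun q =>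
      (["definitely-disagree", "slightly-disagree"]).map (fun a => ("q" ++ PySem.Int.toStr q, a))))

-- sum(1 for item in responses.items() if item in scoring)
def calculate_aq10_score_alt (responses : List (String × String)) : Int :=
  (responses.countP (fun item => PySem.Set.contains aq10Scoring item) : Int)

-- ===== PRECONDITION & SPEC =====
-- Pre_ excludes association lists with duplicate keys: a Python dict never has them, so such
-- lists are an ambiguous encoding of A's dict argument (A's port reads the first binding of a
-- key, B's port counts every binding).
def Pre_calculate_aq10_score (responses : List (String × String)) : Prop :=
  (responses.map Prod.fst).Nodup
instance (responses : List (String × String)) : Decidable (Pre_calculate_aq10_score responses) := by unfold Pre_calculate_aq10_score; infer_instance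

def pvWitness_calculate_aq10_score : (List (String × String)) :=
  [("q1", "definitely-agree"), ("q2", "slightly-disagree"), ("q3", "no")]

def Spec_calculate_aq10_score (responses : List (String × String)) (out : Int) : Prop := out = calculate_aq10_score_alt responses
instance (responses : List (String × String)) (out : Int) : Decidable (Spec_calculate_aq10_score responses out) := by unfold Spec_calculate_aq10_score; infer_instance

-- ===== CLAIM (what is proved, stated in full; the proofs are below) =====
def Claim_equal_calculate_aq10_score : Prop := ∀ (responses : List (String × String)), Dom_calculate_aq10_score responses → Pre_calculate_aq10_score responses → Spec_calculate_aq10_score responses (calculate_aq10_score responses)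

-- ===== LEMMAS AND PROOFS =====

def aq10AgreeL : List String := ["definitely-agree", "slightly-agree"]
def aq10DisL : List String := ["definitely-disagree", "slightly-disagree"]

-- the 20 scoring pairs, as the literal list aq10Scoring evaluates to
def aq10ScoringLit : List (String × String) :=
  [("q1", "definitely-agree"), ("q1", "slightly-agree"),
   ("q7", "definitely-agree"), ("q7", "slightly-agree"),
   ("q8", "definitely-agree"), ("q8", "slightly-agree"),
   ("q10", "definitely-agree"), ("q10", "slightly-agree"),
   ("q2", "definitely-disagree"), ("q2", "slightly-disagree"),
   ("q3", "definitely-disagree"), ("q3", "slightly-disagree"),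
   ("q4", "definitely-disagree"), ("q4", "slightly-disagree"),
   ("q5", "definitely-disagree"), ("q5", "slightly-disagree"),
   ("q6", "definitely-disagree"), ("q6", "slightly-disagree"),
   ("q9", "definitely-disagree"), ("q9", "slightly-disagree")]

theorem aq10Scoring_eq : aq10Scoring = aq10ScoringLit := by decide

-- the contribution of one question: a Bool predicate on one submitted (key, value) pair
def aq10Hit (qk : String) (S : List String) (kv : String × String) : Bool :=
  decide (kv.1 = qk ∧ kv.2 ∈ S)

theorem countP_hit_zero (qk : String) (S : List String) (responses : List (String × String))
    (h : qk ∉ responses.map Prod.fst) : responses.countP (aq10Hit qk S) = 0 := by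
  refine List.countP_eq_zero.mpr ?_
  intro kv hkv
  simp only [aq10Hit, decide_eq_true_eq, not_and]
  intro h1 _
  exact h (by simpa [h1.symm] using List.mem_map_of_mem (f := Prod.fst) hkv)


-- with no duplicate keys, A's indicator for a question equals the count of matching pairs
theorem aq10_ind (qk : String) (S : List String) (hS : "" ∉ S) :
    ∀ (responses : List (String × String)), (responses.map Prod.fst).Nodup →
    (if ((responses.lookup qk).getD "") ∈ S then (1 : Nat) else 0)
      = responses.countP (aq10Hit qk S)
  | [], _ => by simp [hS]
  | (k, v) :: t, hnd => by
    have hnd' : (t.map Prod.fst).Nodup := (List.nodup_cons.mp (by simpa using hnd)).2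
    have hk : k ∉ t.map Prod.fst := (List.nodup_cons.mp (by simpa using hnd)).1
    by_cases hkq : k = qk
    · subst hkq
      have h0 : t.countP (aq10Hit k S) = 0 := countP_hit_zero k S t hk
      simp [List.lookup, List.countP_cons, aq10Hit, h0]
    · have ih := aq10_ind qk S hS t hnd'
      have hb : (qk == k) = false := beq_eq_false_iff_ne.mpr (Ne.symm hkq)
      simp only [List.lookup, hb, List.countP_cons, aq10Hit, decide_eq_true_eq]
      rw [ih]
      simp [hkq]

-- pointwise: a single pair is in the scoring set iff it scores for one of the ten questions
theorem aq10_point (x y : String) :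
    (if PySem.Set.contains aq10ScoringLit (x, y) = true then (1 : Nat) else 0)
    = ((if aq10Hit "q1" aq10AgreeL (x, y) = true then 1 else 0)
      + (if aq10Hit "q7" aq10AgreeL (x, y) = true then 1 else 0)
      + (if aq10Hit "q8" aq10AgreeL (x, y) = true then 1 else 0)
      + (if aq10Hit "q10" aq10AgreeL (x, y) = true then 1 else 0)
      + (if aq10Hit "q2" aq10DisL (x, y) = true then 1 else 0)
      + (if aq10Hit "q3" aq10DisL (x, y) = true then 1 else 0)
      + (if aq10Hit "q4" aq10DisL (x, y) = true then 1 else 0)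
      + (if aq10Hit "q5" aq10DisL (x, y) = true then 1 else 0)
      + (if aq10Hit "q6" aq10DisL (x, y) = true then 1 else 0)
      + (if aq10Hit "q9" aq10DisL (x, y) = true then 1 else 0)) := by
  simp only [aq10ScoringLit, aq10Hit, aq10AgreeL, aq10DisL, PySem.Set.contains,
    List.contains_eq_mem, List.mem_cons, List.not_mem_nil, or_false, Prod.mk.injEq,
    decide_eq_true_eq]
  by_cases h : (x = "q1" ∧ y = "definitely-agree") ∨ (x = "q1" ∧ y = "slightly-agree")
      ∨ (x = "q7" ∧ y = "definitely-agree") ∨ (x = "q7" ∧ y = "slightly-agree")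
      ∨ (x = "q8" ∧ y = "definitely-agree") ∨ (x = "q8" ∧ y = "slightly-agree")
      ∨ (x = "q10" ∧ y = "definitely-agree") ∨ (x = "q10" ∧ y = "slightly-agree")
      ∨ (x = "q2" ∧ y = "definitely-disagree") ∨ (x = "q2" ∧ y = "slightly-disagree")
      ∨ (x = "q3" ∧ y = "definitely-disagree") ∨ (x = "q3" ∧ y = "slightly-disagree")
      ∨ (x = "q4" ∧ y = "definitely-disagree") ∨ (x = "q4" ∧ y = "slightly-disagree")
      ∨ (x = "q5" ∧ y = "definitely-disagree") ∨ (x = "q5" ∧ y = "slightly-disagree")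
      ∨ (x = "q6" ∧ y = "definitely-disagree") ∨ (x = "q6" ∧ y = "slightly-disagree")
      ∨ (x = "q9" ∧ y = "definitely-disagree") ∨ (x = "q9" ∧ y = "slightly-disagree")
  · rcases h with ⟨rfl, rfl⟩ | ⟨rfl, rfl⟩ | ⟨rfl, rfl⟩ | ⟨rfl, rfl⟩ | ⟨rfl, rfl⟩
      | ⟨rfl, rfl⟩ | ⟨rfl, rfl⟩ | ⟨rfl, rfl⟩ | ⟨rfl, rfl⟩ | ⟨rfl, rfl⟩ | ⟨rfl, rfl⟩
      | ⟨rfl, rfl⟩ | ⟨rfl, rfl⟩ | ⟨rfl, rfl⟩ | ⟨rfl, rfl⟩ | ⟨rfl, rfl⟩ | ⟨rfl, rfl⟩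
      | ⟨rfl, rfl⟩ | ⟨rfl, rfl⟩ | ⟨rfl, rfl⟩ <;> decide
  · rw [if_neg h]
    have n1 : ¬(x = "q1" ∧ (y = "definitely-agree" ∨ y = "slightly-agree")) := by
      rintro ⟨rfl, rfl | rfl⟩ <;> exact h (by tauto)
    have n7 : ¬(x = "q7" ∧ (y = "definitely-agree" ∨ y = "slightly-agree")) := by
      rintro ⟨rfl, rfl | rfl⟩ <;> exact h (by tauto)
    have n8 : ¬(x = "q8" ∧ (y = "definitely-agree" ∨ y = "slightly-agree")) := by
      rintro ⟨rfl, rfl | rfl⟩ <;> exact h (by tauto)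
    have n10 : ¬(x = "q10" ∧ (y = "definitely-agree" ∨ y = "slightly-agree")) := by
      rintro ⟨rfl, rfl | rfl⟩ <;> exact h (by tauto)
    have n2 : ¬(x = "q2" ∧ (y = "definitely-disagree" ∨ y = "slightly-disagree")) := by
      rintro ⟨rfl, rfl | rfl⟩ <;> exact h (by tauto)
    have n3 : ¬(x = "q3" ∧ (y = "definitely-disagree" ∨ y = "slightly-disagree")) := by
      rintro ⟨rfl, rfl | rfl⟩ <;> exact h (by tauto)
    have n4 : ¬(x = "q4" ∧ (y = "definitely-disagree" ∨ y = "slightly-disagree")) := by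
      rintro ⟨rfl, rfl | rfl⟩ <;> exact h (by tauto)
    have n5 : ¬(x = "q5" ∧ (y = "definitely-disagree" ∨ y = "slightly-disagree")) := by
      rintro ⟨rfl, rfl | rfl⟩ <;> exact h (by tauto)
    have n6 : ¬(x = "q6" ∧ (y = "definitely-disagree" ∨ y = "slightly-disagree")) := by
      rintro ⟨rfl, rfl | rfl⟩ <;> exact h (by tauto)
    have n9 : ¬(x = "q9" ∧ (y = "definitely-disagree" ∨ y = "slightly-disagree")) := by
      rintro ⟨rfl, rfl | rfl⟩ <;> exact h (by tauto)
    rw [if_neg n1, if_neg n7, if_neg n8, if_neg n10, if_neg n2, if_neg n3, if_neg n4,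
      if_neg n5, if_neg n6, if_neg n9]

-- B's count splits into the ten per-question counts
theorem aq10_split : ∀ (responses : List (String × String)),
    responses.countP (fun kv => PySem.Set.contains aq10ScoringLit kv)
    = responses.countP (aq10Hit "q1" aq10AgreeL) + responses.countP (aq10Hit "q7" aq10AgreeL)
      + responses.countP (aq10Hit "q8" aq10AgreeL) + responses.countP (aq10Hit "q10" aq10AgreeL)
      + responses.countP (aq10Hit "q2" aq10DisL) + responses.countP (aq10Hit "q3" aq10DisL)
      + responses.countP (aq10Hit "q4" aq10DisL) + responses.countP (aq10Hit "q5" aq10DisL)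
      + responses.countP (aq10Hit "q6" aq10DisL) + responses.countP (aq10Hit "q9" aq10DisL)
  | [] => by simp
  | (x, y) :: t => by
    have ih := aq10_split t
    have hp := aq10_point x y
    simp only [List.countP_cons] at *
    omega

-- ===== VERDICT (by name: the statement is the Claim_ definition above) =====
theorem calculate_aq10_score_spec : Claim_equal_calculate_aq10_score := by
  intro responses _ hpre
  show calculate_aq10_score responses = calculate_aq10_score_alt responses
  have h1 : "q" ++ PySem.Int.toStr (1 : Int) = "q1" := by decide
  have h2 : "q" ++ PySem.Int.toStr (2 : Int) = "q2" := by decide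
  have h3 : "q" ++ PySem.Int.toStr (3 : Int) = "q3" := by decide
  have h4 : "q" ++ PySem.Int.toStr (4 : Int) = "q4" := by decide
  have h5 : "q" ++ PySem.Int.toStr (5 : Int) = "q5" := by decide
  have h6 : "q" ++ PySem.Int.toStr (6 : Int) = "q6" := by decide
  have h7 : "q" ++ PySem.Int.toStr (7 : Int) = "q7" := by decide
  have h8 : "q" ++ PySem.Int.toStr (8 : Int) = "q8" := by decide
  have h9 : "q" ++ PySem.Int.toStr (9 : Int) = "q9" := by decide
  have h10 : "q" ++ PySem.Int.toStr (10 : Int) = "q10" := by decide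
  have hA : ∀ qk, (if ((responses.lookup qk).getD "") ∈ aq10AgreeL then (1 : Nat) else 0)
      = responses.countP (aq10Hit qk aq10AgreeL) :=
    fun qk => aq10_ind qk aq10AgreeL (by decide) responses hpre
  have hD : ∀ qk, (if ((responses.lookup qk).getD "") ∈ aq10DisL then (1 : Nat) else 0)
      = responses.countP (aq10Hit qk aq10DisL) :=
    fun qk => aq10_ind qk aq10DisL (by decide) responses hpre
  simp only [aq10AgreeL, aq10DisL, List.mem_cons, List.not_mem_nil, or_false] at hA hD
  simp only [calculate_aq10_score, calculate_aq10_score_alt, aq10Scoring_eq]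
  rw [PySem.List.foldl_ite_add_one, PySem.List.foldl_ite_add_one, aq10_split responses]
  simp only [List.countP_cons, List.countP_nil, decide_eq_true_eq, aq10AgreeL, aq10DisL,
    h1, h2, h3, h4, h5, h6, h7, h8, h9, h10]
  rw [← hA "q1", ← hA "q7", ← hA "q8", ← hA "q10",
    ← hD "q2", ← hD "q3", ← hD "q4", ← hD "q5", ← hD "q6", ← hD "q9"]
  push_cast
  ring
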